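-- pv_equiv track=rewrite | github.com/ProtocolCHecker/astrology-api | astrology_tool.py | _interpret_growth_transits
-- ===== SOURCE A (Python) =====
-- def _interpret_growth_transits(all_aspects):
--     """Interpret transits related to personal growth and spirituality"""
--     # Growth related planets
--     growth_planets = ["Jupiter", "Saturn", "Uranus", "Neptune", "Pluto"]
--     growth_aspects = []
--
--     # Filter relevant aspects
--     for aspect in all_aspects:
--         if aspect["transit_planet"] in growth_planets:
--             growth_aspects.append(aspect)
--
--     if not growth_aspects:
--         return "Focus on existing personal development paths this week."
--
--     # Count aspect types by planet
--     jupiter_aspects = [a for a in growth_aspects if a["transit_planet"] == "Jupiter"]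
--     saturn_aspects = [a for a in growth_aspects if a["transit_planet"] == "Saturn"]
--     outer_aspects = [a for a in growth_aspects if a["transit_planet"] in ["Uranus", "Neptune", "Pluto"]]
--
--     # Generate interpretation
--     if jupiter_aspects and saturn_aspects:
--         interpretation = "Balance expansion with structure in your personal growth. Learn from challenges while remaining optimistic."
--     elif jupiter_aspects:
--         interpretation = "Opportunities for expansion and meaningful growth appear this week. Follow your inspirations."
--     elif saturn_aspects:
--         interpretation = "Focus on discipline and making your growth practical and sustainable."
--     elif outer_aspects:
--         interpretation = "Deeper transformative processes are active. Pay attention to insights and subtle shifts."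
--     else:
--         interpretation = "Mixed influences support steady progress on your personal journey."
--
--     return interpretation
-- ===== SOURCE B (Python) =====
-- def _interpret_growth_transits(all_aspects):
--     """Interpret transits related to personal growth and spirituality"""
--     # One pass: record which growth-planet groups appear at all.
--     has_jupiter = has_saturn = has_outer = False
--     for aspect in all_aspects:
--         p = aspect["transit_planet"]
--         if p == "Jupiter":
--             has_jupiter = True
--         elif p == "Saturn":
--             has_saturn = True
--         elif p in ("Uranus", "Neptune", "Pluto"):
--             has_outer = True
--
--     if not (has_jupiter or has_saturn or has_outer):
--         return "Focus on existing personal development paths this week."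
--     if has_jupiter and has_saturn:
--         return "Balance expansion with structure in your personal growth. Learn from challenges while remaining optimistic."
--     if has_jupiter:
--         return "Opportunities for expansion and meaningful growth appear this week. Follow your inspirations."
--     if has_saturn:
--         return "Focus on discipline and making your growth practical and sustainable."
--     return "Deeper transformative processes are active. Pay attention to insights and subtle shifts."
-- ===== Notes on version B (the rewrite author's own statement) =====
-- stated objective: simpler
-- what changed: B replaces A's four list-building passes (growth filter plus three comprehensions) with one pass over all_aspects maintaining three presence booleans, returning each message directly from the flags (A's final else is unreachable and B has no counterpart for it).
import Mathlib
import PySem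

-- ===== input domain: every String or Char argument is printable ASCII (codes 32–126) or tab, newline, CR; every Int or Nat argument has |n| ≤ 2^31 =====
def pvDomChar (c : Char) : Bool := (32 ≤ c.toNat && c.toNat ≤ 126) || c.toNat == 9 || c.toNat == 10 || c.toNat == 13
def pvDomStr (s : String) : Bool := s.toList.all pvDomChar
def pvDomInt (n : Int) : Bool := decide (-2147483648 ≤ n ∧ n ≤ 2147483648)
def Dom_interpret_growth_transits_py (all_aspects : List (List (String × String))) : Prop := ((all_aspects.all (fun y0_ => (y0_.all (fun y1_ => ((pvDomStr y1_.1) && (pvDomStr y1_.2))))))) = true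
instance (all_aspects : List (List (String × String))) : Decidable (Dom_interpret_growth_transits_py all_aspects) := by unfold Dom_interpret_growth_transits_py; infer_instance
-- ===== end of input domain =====

-- B is a single pass with three presence flags instead of A's filter plus three list comprehensions; return value only.

-- aspect["transit_planet"]: first-match association-list lookup (Python dict get); "" only outside Pre_
def pvPlanet (a : List (String × String)) : String :=
  ((a.find? (fun p => p.1 == "transit_planet")).map (·.2)).getD ""

-- ===== PORT A =====
def interpret_growth_transits_py (all_aspects : List (List (String × String))) : String :=
  let growth_planets := ["Jupiter", "Saturn", "Uranus", "Neptune", "Pluto"]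
  let growth_aspects := all_aspects.filter (fun a => growth_planets.contains (pvPlanet a))
  if growth_aspects = [] then
    "Focus on existing personal development paths this week."
  else
    let jupiter_aspects := growth_aspects.filter (fun a => pvPlanet a == "Jupiter")
    let saturn_aspects := growth_aspects.filter (fun a => pvPlanet a == "Saturn")
    let outer_aspects := growth_aspects.filter (fun a => ["Uranus", "Neptune", "Pluto"].contains (pvPlanet a))
    if jupiter_aspects ≠ [] ∧ saturn_aspects ≠ [] then
      "Balance expansion with structure in your personal growth. Learn from challenges while remaining optimistic."
    else if jupiter_aspects ≠ [] then
      "Opportunities for expansion and meaningful growth appear this week. Follow your inspirations."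
    else if saturn_aspects ≠ [] then
      "Focus on discipline and making your growth practical and sustainable."
    else if outer_aspects ≠ [] then
      "Deeper transformative processes are active. Pay attention to insights and subtle shifts."
    else
      "Mixed influences support steady progress on your personal journey."

-- ===== PORT B =====
def interpret_growth_transits_py_alt (all_aspects : List (List (String × String))) : String :=
  let flags := all_aspects.foldl (fun (st : Bool × Bool × Bool) aspect =>
      let p := pvPlanet aspect
      if p == "Jupiter" then (true, st.2.1, st.2.2)
      else if p == "Saturn" then (st.1, true, st.2.2)
      else if p == "Uranus" || p == "Neptune" || p == "Pluto" then (st.1, st.2.1, true)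
      else st) (false, false, false)
  let has_jupiter := flags.1
  let has_saturn := flags.2.1
  let has_outer := flags.2.2
  if !(has_jupiter || has_saturn || has_outer) then
    "Focus on existing personal development paths this week."
  else if has_jupiter && has_saturn then
    "Balance expansion with structure in your personal growth. Learn from challenges while remaining optimistic."
  else if has_jupiter then
    "Opportunities for expansion and meaningful growth appear this week. Follow your inspirations."
  else if has_saturn then
    "Focus on discipline and making your growth practical and sustainable."
  else
    "Deeper transformative processes are active. Pay attention to insights and subtle shifts."

-- ===== PRECONDITION & SPEC =====
-- Pre_: every aspect dict has the key "transit_planet"; otherwise Python A raises KeyError.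
def Pre_interpret_growth_transits_py (all_aspects : List (List (String × String))) : Prop :=
  (all_aspects.all (fun a => a.any (fun p => p.1 == "transit_planet"))) = true
instance (all_aspects : List (List (String × String))) : Decidable (Pre_interpret_growth_transits_py all_aspects) := by unfold Pre_interpret_growth_transits_py; infer_instance
def pvWitness_interpret_growth_transits_py : (List (List (String × String))) := [[("transit_planet", "Jupiter")]]
def Spec_interpret_growth_transits_py (all_aspects : List (List (String × String))) (out : String) : Prop := out = interpret_growth_transits_py_alt all_aspects
instance (all_aspects : List (List (String × String))) (out : String) : Decidable (Spec_interpret_growth_transits_py all_aspects out) := by unfold Spec_interpret_growth_transits_py; infer_instance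

-- ===== CLAIM (what is proved, stated in full; the proofs are below) =====
def Claim_equal_interpret_growth_transits_py : Prop := ∀ (all_aspects : List (List (String × String))), Dom_interpret_growth_transits_py all_aspects → Pre_interpret_growth_transits_py all_aspects → Spec_interpret_growth_transits_py all_aspects (interpret_growth_transits_py all_aspects)

-- ===== LEMMAS AND PROOFS =====
def isJ (a : List (String × String)) : Bool := pvPlanet a == "Jupiter"
def isS (a : List (String × String)) : Bool := pvPlanet a == "Saturn"
def isO (a : List (String × String)) : Bool := pvPlanet a == "Uranus" || pvPlanet a == "Neptune" || pvPlanet a == "Pluto"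

lemma foldl_flags (l : List (List (String × String))) (st : Bool × Bool × Bool) :
    l.foldl (fun (st : Bool × Bool × Bool) aspect =>
      let p := pvPlanet aspect
      if p == "Jupiter" then (true, st.2.1, st.2.2)
      else if p == "Saturn" then (st.1, true, st.2.2)
      else if p == "Uranus" || p == "Neptune" || p == "Pluto" then (st.1, st.2.1, true)
      else st) st = (st.1 || l.any isJ, st.2.1 || l.any isS, st.2.2 || l.any isO) := by
  induction l generalizing st with
  | nil => simp
  | cons a t ih =>
    simp only [List.foldl_cons, List.any_cons]
    rw [ih]
    clear ih
    by_cases hj : pvPlanet a = "Jupiter"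
    · simp_all [isJ, isS, isO]
    · by_cases hs : pvPlanet a = "Saturn"
      · simp_all [isJ, isS, isO]
      · have e1 : (pvPlanet a == "Jupiter") = false := by simp [hj]
        have e2 : (pvPlanet a == "Saturn") = false := by simp [hs]
        by_cases ho : (pvPlanet a = "Uranus" ∨ pvPlanet a = "Neptune" ∨ pvPlanet a = "Pluto")
        · rcases ho with h | h | h <;> simp [h, isJ, isS, isO]
        · have e3 : (pvPlanet a == "Uranus") = false := by simp; tauto
          have e4 : (pvPlanet a == "Neptune") = false := by simp; tauto
          have e5 : (pvPlanet a == "Pluto") = false := by simp; tauto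
          simp [e1, e2, e3, e4, e5, isJ, isS, isO]

lemma filter_ne_nil_iff_any {α : Type} (l : List α) (p : α → Bool) :
    (l.filter p ≠ []) ↔ l.any p = true := by
  simp [Ne, List.filter_eq_nil_iff, List.any_eq_true]

lemma growth_cases (a : List (String × String)) :
    (["Jupiter", "Saturn", "Uranus", "Neptune", "Pluto"].contains (pvPlanet a)) = (isJ a || isS a || isO a) := by
  simp only [List.contains_eq_any_beq, List.any_cons, List.any_nil, isJ, isS, isO, Bool.or_false]
  ac_rfl

-- ===== VERDICT (by name: the statement is the Claim_ definition above) =====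
theorem interpret_growth_transits_py_spec : Claim_equal_interpret_growth_transits_py := by
  intro l _ _
  show interpret_growth_transits_py l = interpret_growth_transits_py_alt l
  unfold interpret_growth_transits_py interpret_growth_transits_py_alt
  simp only [foldl_flags]
  set ga := l.filter (fun a => ["Jupiter", "Saturn", "Uranus", "Neptune", "Pluto"].contains (pvPlanet a)) with hga
  have hJ : (ga.filter (fun a => pvPlanet a == "Jupiter") ≠ []) ↔ l.any isJ = true := by
    rw [filter_ne_nil_iff_any, hga, List.any_filter]
    constructor <;> intro h <;> (rw [List.any_eq_true] at *; rcases h with ⟨x, hx, hp⟩; refine ⟨x, hx, ?_⟩) <;>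
      simp_all [isJ]
  have hS : (ga.filter (fun a => pvPlanet a == "Saturn") ≠ []) ↔ l.any isS = true := by
    rw [filter_ne_nil_iff_any, hga, List.any_filter]
    constructor <;> intro h <;> (rw [List.any_eq_true] at *; rcases h with ⟨x, hx, hp⟩; refine ⟨x, hx, ?_⟩) <;>
      simp_all [isS]
  have hO : (ga.filter (fun a => ["Uranus", "Neptune", "Pluto"].contains (pvPlanet a)) ≠ []) ↔ l.any isO = true := by
    rw [filter_ne_nil_iff_any, hga, List.any_filter]
    constructor <;> intro h <;> (rw [List.any_eq_true] at *; rcases h with ⟨x, hx, hp⟩; refine ⟨x, hx, ?_⟩) <;>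
      (simp_all [isO]; try tauto)
  have hE : (ga = []) ↔ (l.any isJ = false ∧ l.any isS = false ∧ l.any isO = false) := by
    rw [hga, List.filter_eq_nil_iff]
    simp only [growth_cases, Bool.not_eq_true, Bool.or_eq_false_iff, List.any_eq_false,
      Bool.not_eq_true]
    constructor
    · intro h
      exact ⟨fun x hx => by simpa using ((h x hx).1.1), fun x hx => by simpa using ((h x hx).1.2),
        fun x hx => by simpa using ((h x hx).2)⟩
    · intro h x hx
      exact ⟨⟨by simpa using h.1 x hx, by simpa using h.2.1 x hx⟩, by simpa using h.2.2 x hx⟩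
  simp only [ne_eq] at hJ hS hO

  by_cases h1 : l.any isJ = true <;> by_cases h2 : l.any isS = true <;> by_cases h3 : l.any isO = true <;>
    simp only [hE, hJ, hS, hO] <;> simp [h1, h2, h3]
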